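-- pv_equiv track=rewrite | github.com/jaejae2374/CodingTest | 공이동시뮬레이션/solution.py | solution
-- ===== SOURCE A (Python) =====
-- def solution(n, m, x, y, queries):
--     left, right = y, y
--     up, down = x, x
--     for d, q in queries[::-1]:
--         if d==0:
--             if left!=0:
--                 left+=q
--             right = min(m-1, right+q)
--         elif d==1:
--             if right!=m-1:
--                 right-=q
--             left = max(0, left-q)
--         elif d==2:
--             if up!=0:
--                 up+=q
--             down = min(n-1, down+q)
--         else:
--             if down!=n-1:
--                 down-=q
--             up = max(0, up-q)
--         if up>down or left>right: return 0
--     return (down-up+1)*(right-left+1)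
-- ===== SOURCE B (Python) =====
-- def _hpass(m, left, right, rev):
--     # horizontal bounds only: d==0 and d==1 queries; None = crossed
--     for d, q in rev:
--         if d == 0:
--             if left != 0:
--                 left += q
--             right = min(m - 1, right + q)
--         elif d == 1:
--             if right != m - 1:
--                 right -= q
--             left = max(0, left - q)
--         else:
--             continue
--         if left > right:
--             return None
--     return left, right
--
--
-- def _vpass(n, up, down, rev):
--     # vertical bounds only: d==2 and other (d==3) queries; None = crossed
--     for d, q in rev:
--         if d == 0 or d == 1:
--             continue
--         elif d == 2:
--             if up != 0:
--                 up += q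
--             down = min(n - 1, down + q)
--         else:
--             if down != n - 1:
--                 down -= q
--             up = max(0, up - q)
--         if up > down:
--             return None
--     return up, down
--
--
-- def solution(n, m, x, y, queries):
--     rev = queries[::-1]
--     h = _hpass(m, y, y, rev)
--     v = _vpass(n, x, x, rev)
--     if h is None or v is None:
--         return 0
--     left, right = h
--     up, down = v
--     return (down - up + 1) * (right - left + 1)
-- ===== Notes on version B (the rewrite author's own statement) =====
-- stated objective: alternative
-- what changed: Splits the single interleaved backward simulation into two independent single-dimension passes (horizontal d in {0,1}, vertical d in {2,3}) that each stop at a crossing; returns 0 iff either pass crossed, else the product of the two independently computed extents.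
import Mathlib
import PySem

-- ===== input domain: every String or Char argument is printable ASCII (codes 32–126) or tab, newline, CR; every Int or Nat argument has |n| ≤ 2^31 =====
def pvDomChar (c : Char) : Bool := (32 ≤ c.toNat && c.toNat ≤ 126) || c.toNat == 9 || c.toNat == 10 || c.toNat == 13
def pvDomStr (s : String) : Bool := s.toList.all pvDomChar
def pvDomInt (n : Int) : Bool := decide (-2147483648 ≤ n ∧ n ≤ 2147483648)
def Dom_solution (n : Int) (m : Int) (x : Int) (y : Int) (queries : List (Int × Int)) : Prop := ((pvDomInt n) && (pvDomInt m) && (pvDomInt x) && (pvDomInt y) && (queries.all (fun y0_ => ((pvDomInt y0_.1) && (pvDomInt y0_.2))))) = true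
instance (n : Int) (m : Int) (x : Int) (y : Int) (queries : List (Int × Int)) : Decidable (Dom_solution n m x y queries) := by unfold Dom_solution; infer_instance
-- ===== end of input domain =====

-- B replaces A's single interleaved backward loop by two independent single-dimension
-- passes (alternative decomposition, same asymptotic cost).

-- ===== PORT A =====
-- A's single backward loop over queries[::-1]; state (left,right,up,down), early return 0 on crossing.
def solLoopA (n : Int) (m : Int) (left right up down : Int) : List (Int × Int) → Int
  | [] => (down - up + 1) * (right - left + 1)
  | (d, q) :: rest =>
    let s :=
      if d = 0 then
        ((if left ≠ 0 then left + q else left), min (m - 1) (right + q), up, down)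
      else if d = 1 then
        ((max 0 (left - q)), (if right ≠ m - 1 then right - q else right), up, down)
      else if d = 2 then
        (left, right, (if up ≠ 0 then up + q else up), min (n - 1) (down + q))
      else
        (left, right, (max 0 (up - q)), (if down ≠ n - 1 then down - q else down))
    if s.2.2.1 > s.2.2.2 ∨ s.1 > s.2.1 then 0
    else solLoopA n m s.1 s.2.1 s.2.2.1 s.2.2.2 rest

def solution (n : Int) (m : Int) (x : Int) (y : Int) (queries : List (Int × Int)) : Int :=
  -- queries[::-1] is exactly List.reverse
  solLoopA n m y y x x queries.reverse

-- ===== PORT B =====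
-- horizontal pass: only d=0/d=1 queries touch (left,right); none = crossed
def hpass (m : Int) (left right : Int) : List (Int × Int) → Option (Int × Int)
  | [] => some (left, right)
  | (d, q) :: rest =>
    if d = 0 then
      let l := if left ≠ 0 then left + q else left
      let r := min (m - 1) (right + q)
      if l > r then none else hpass m l r rest
    else if d = 1 then
      let l := max 0 (left - q)
      let r := if right ≠ m - 1 then right - q else right
      if l > r then none else hpass m l r rest
    else hpass m left right rest

-- vertical pass: only d=2/other queries touch (up,down); none = crossed
def vpass (n : Int) (up down : Int) : List (Int × Int) → Option (Int × Int)
  | [] => some (up, down)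
  | (d, q) :: rest =>
    if d = 0 ∨ d = 1 then vpass n up down rest
    else if d = 2 then
      let u := if up ≠ 0 then up + q else up
      let w := min (n - 1) (down + q)
      if u > w then none else vpass n u w rest
    else
      let u := max 0 (up - q)
      let w := if down ≠ n - 1 then down - q else down
      if u > w then none else vpass n u w rest

def solution_alt (n : Int) (m : Int) (x : Int) (y : Int) (queries : List (Int × Int)) : Int :=
  let rev := queries.reverse
  match hpass m y y rev, vpass n x x rev with
  | some (l, r), some (u, w) => (w - u + 1) * (r - l + 1)
  | _, _ => 0

-- ===== PRECONDITION & SPEC =====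
def Spec_solution (n : Int) (m : Int) (x : Int) (y : Int) (queries : List (Int × Int)) (out : Int) : Prop := out = solution_alt n m x y queries
instance (n : Int) (m : Int) (x : Int) (y : Int) (queries : List (Int × Int)) (out : Int) : Decidable (Spec_solution n m x y queries out) := by unfold Spec_solution; infer_instance

-- ===== CLAIM (what is proved, stated in full; the proofs are below) =====
def Claim_equal_solution : Prop := ∀ (n : Int) (m : Int) (x : Int) (y : Int) (queries : List (Int × Int)), Dom_solution n m x y queries → Spec_solution n m x y queries (solution n m x y queries)

-- ===== LEMMAS AND PROOFS =====

-- Core invariant: with non-crossed bounds, A's interleaved loop equals the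
-- combination of the two independent passes.
theorem solLoopA_eq_passes (n m : Int) :
    ∀ (qs : List (Int × Int)) (l r u w : Int), l ≤ r → u ≤ w →
      solLoopA n m l r u w qs =
        (match hpass m l r qs, vpass n u w qs with
         | some (l', r'), some (u', w') => (w' - u' + 1) * (r' - l' + 1)
         | _, _ => 0) := by
  intro qs
  induction qs with
  | nil => intro l r u w _ _; simp [solLoopA, hpass, vpass]
  | cons p rest ih =>
    intro l r u w hlr huw
    obtain ⟨d, q⟩ := p
    by_cases h0 : d = 0
    · subst h0
      simp only [solLoopA, hpass, vpass]
      norm_num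
      split_ifs <;>
        first
        | omega
        | (exact ih _ _ _ _ (by omega) (by omega))
        | (rcases vpass n u w rest with _ | ⟨a, b⟩ <;> rfl)
        | (rcases hpass m l r rest with _ | ⟨a, b⟩ <;> rfl)
    · by_cases h1 : d = 1
      · subst h1
        simp only [solLoopA, hpass, vpass]
        norm_num
        split_ifs <;>
          first
          | omega
          | (exact ih _ _ _ _ (by omega) (by omega))
          | (rcases vpass n u w rest with _ | ⟨a, b⟩ <;> rfl)
          | (rcases hpass m l r rest with _ | ⟨a, b⟩ <;> rfl)
      · by_cases h2 : d = 2
        · subst h2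
          simp only [solLoopA, hpass, vpass]
          norm_num
          split_ifs <;>
            first
            | omega
            | (exact ih _ _ _ _ (by omega) (by omega))
            | (rcases vpass n u w rest with _ | ⟨a, b⟩ <;> rfl)
            | (rcases hpass m l r rest with _ | ⟨a, b⟩ <;> rfl)
        · simp only [solLoopA, hpass, vpass, if_neg h0, if_neg h1, if_neg h2,
            if_neg (by simp [h0, h1] : ¬ (d = 0 ∨ d = 1))]
          split_ifs <;>
            first
            | omega
            | (exact ih _ _ _ _ (by omega) (by omega))
            | (rcases vpass n u w rest with _ | ⟨a, b⟩ <;> rfl)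
            | (rcases hpass m l r rest with _ | ⟨a, b⟩ <;> rfl)

-- ===== VERDICT (by name: the statement is the Claim_ definition above) =====
theorem solution_spec : Claim_equal_solution := by
  intro n m x y queries _
  unfold Spec_solution solution solution_alt
  exact solLoopA_eq_passes n m queries.reverse y y x x le_rfl le_rfl
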